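-- pv_equiv track=rewrite | github.com/ggllima/CodeWarsSolutions | Python/fundamentals/mumbling.py | accum
-- ===== SOURCE A (Python) =====
-- def accum(x):
--     l = []
--     k = 1
--     for i in x:
--         l.append(i * k)
--         k+=1
--     w = [i.capitalize() for i in l]
--     w = '-'.join(w)
--     return w
-- ===== SOURCE B (Python) =====
-- def accum(x):
--     out = ''
--     for i, c in enumerate(x):
--         if i:
--             out += '-'
--         out += c.upper()
--         lc = c.lower()
--         for _ in range(i):
--             out += lc
--     return out
-- ===== Notes on version B (the rewrite author's own statement) =====
-- stated objective: alternative
-- what changed: Single fused loop that emits the result character stream directly into one string accumulator (dash separator inline, the uppercased char, then an inner counted loop appending the lowercase char once per repetition), replacing A's staged pipeline of string-multiplication segments, a capitalize mapping pass, and a join with the separator; it trades A's bulk string operations for per-character appends (a constant factor slower).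
import Mathlib
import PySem

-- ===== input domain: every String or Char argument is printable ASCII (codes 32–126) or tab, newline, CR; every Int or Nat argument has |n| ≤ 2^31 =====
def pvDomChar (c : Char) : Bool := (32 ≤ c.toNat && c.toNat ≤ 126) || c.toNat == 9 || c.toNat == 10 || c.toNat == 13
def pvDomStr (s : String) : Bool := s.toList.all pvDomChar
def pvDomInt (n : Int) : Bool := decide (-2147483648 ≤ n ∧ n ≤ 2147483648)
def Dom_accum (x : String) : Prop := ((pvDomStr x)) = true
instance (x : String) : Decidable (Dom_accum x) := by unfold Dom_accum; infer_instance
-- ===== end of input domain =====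

-- B replaces A's staged pipeline (repeated-string segments, capitalize map, join with the separator)
-- by a single fused loop emitting the result character stream into one accumulator (alternative decomposition; trades bulk string ops for per-char appends).


-- ===== PORT A =====
-- str.capitalize(): first char uppercased, rest lowercased (exact on the ASCII domain)
def capPy (cs : List Char) : List Char :=
  match cs with
  | [] => []
  | c :: rest => PySem.Chars.upperChar c :: PySem.Chars.lower rest

def accum (x : String) : String :=
  let st := x.toList.foldl
    (fun (st : List (List Char) × Int) i => (st.1 ++ [PySem.List.pyRepeat [i] st.2], st.2 + 1))
    ([], 1)
  let w := st.1.map capPy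
  String.ofList (PySem.Chars.join ['-'] w)

-- ===== PORT B =====
-- one accumulator loop (Python str accumulator ≙ List Char): separator if i ≠ 0, the uppercased
-- char, then the inner 'for _ in range(i): out += lc' (lc = c.lower()) appending one char i times (= List.replicate i.toNat)
def accum_alt (x : String) : String :=
  String.ofList ((PySem.List.enumerate x.toList 0).foldl
    (fun (out : List Char) p =>
      ((if p.1 ≠ 0 then out ++ ['-'] else out) ++ [PySem.Chars.upperChar p.2])
        ++ List.replicate p.1.toNat (PySem.Chars.lowerChar p.2))
    [])

-- ===== PRECONDITION & SPEC =====
def Spec_accum (x : String) (out : String) : Prop := out = accum_alt x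
instance (x : String) (out : String) : Decidable (Spec_accum x out) := by unfold Spec_accum; infer_instance

-- ===== CLAIM (what is proved, stated in full; the proofs are below) =====
def Claim_equal_accum : Prop := ∀ (x : String), Dom_accum x → Spec_accum x (accum x)

-- ===== LEMMAS AND PROOFS =====

-- the common mumbled segment for index i and char c
def pvSeg (i : Int) (c : Char) : List Char :=
  PySem.Chars.upperChar c :: List.replicate i.toNat (PySem.Chars.lowerChar c)

-- A's fold: the capitalized segment list is the enumerate-mapped segments
lemma accum_fold_key (cs : List Char) : ∀ (acc : List (List Char)) (n : Nat),
    ((cs.foldl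
        (fun (st : List (List Char) × Int) i => (st.1 ++ [PySem.List.pyRepeat [i] st.2], st.2 + 1))
        (acc, (n : Int) + 1)).1).map capPy
      = acc.map capPy ++ (PySem.List.enumerate cs (n : Int)).map (fun p => pvSeg p.1 p.2) := by
  induction cs with
  | nil => intro acc n; simp [PySem.List.enumerate_nil]
  | cons c cs ih =>
    intro acc n
    have h1 : ((n : Int) + 1) + 1 = ((n + 1 : Nat) : Int) + 1 := by push_cast; ring
    simp only [List.foldl_cons, h1]
    rw [ih (acc ++ [PySem.List.pyRepeat [c] ((n : Int) + 1)]) (n + 1)]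
    have hseg : capPy (List.replicate (n + 1) c) = pvSeg (n : Int) c := by
      rw [List.replicate_succ]
      simp [capPy, pvSeg, PySem.Chars.lower]
    have h2 : ((n + 1 : Nat) : Int) = (n : Int) + 1 := by push_cast; ring
    simp [PySem.List.enumerate_cons, hseg, h2]

-- join with '-' of a nonempty segment list, as a flat list
lemma join_dash_cons (s : List Char) (ss : List (List Char)) :
    PySem.Chars.join ['-'] (s :: ss) = s ++ ss.flatMap (fun t => '-' :: t) := by
  induction ss generalizing s with
  | nil => simp [PySem.Chars.join, List.intercalate]
  | cons t ts ih =>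
    simp only [PySem.Chars.join] at ih ⊢
    rw [show ['-'].intercalate (s :: t :: ts) = s ++ '-' :: ['-'].intercalate (t :: ts) by
      simp [List.intercalate, List.intersperse]]
    rw [ih t]
    simp

-- B's fold from a positive start index appends the dash-prefixed segments
lemma bfold_key (cs : List Char) : ∀ (n : Int), 1 ≤ n → ∀ (out : List Char),
    (PySem.List.enumerate cs n).foldl
      (fun (out : List Char) p =>
        ((if p.1 ≠ 0 then out ++ ['-'] else out) ++ [PySem.Chars.upperChar p.2])
          ++ List.replicate p.1.toNat (PySem.Chars.lowerChar p.2))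
      out
    = out ++ (PySem.List.enumerate cs n).flatMap (fun p => '-' :: pvSeg p.1 p.2) := by
  induction cs with
  | nil => intro n _ out; simp [PySem.List.enumerate_nil]
  | cons c cs ih =>
    intro n hn out
    have hne : n ≠ 0 := by omega
    rw [PySem.List.enumerate_cons]
    simp only [List.foldl_cons, List.flatMap_cons, if_pos hne]
    rw [ih (n + 1) (by omega)]
    simp [pvSeg]

-- the two list-level computations agree
lemma accum_lists_key (cs : List Char) :
    PySem.Chars.join ['-']
      (((cs.foldl
          (fun (st : List (List Char) × Int) i => (st.1 ++ [PySem.List.pyRepeat [i] st.2], st.2 + 1))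
          ([], 1)).1).map capPy)
    = (PySem.List.enumerate cs 0).foldl
        (fun (out : List Char) p =>
          ((if p.1 ≠ 0 then out ++ ['-'] else out) ++ [PySem.Chars.upperChar p.2])
            ++ List.replicate p.1.toNat (PySem.Chars.lowerChar p.2))
        [] := by
  have hA := accum_fold_key cs [] 0
  simp only [Nat.cast_zero, zero_add, List.map_nil, List.nil_append] at hA
  rw [hA]
  cases cs with
  | nil => simp [PySem.List.enumerate_nil, PySem.Chars.join, List.intercalate]
  | cons c cs =>
    rw [PySem.List.enumerate_cons, List.map_cons, join_dash_cons, List.foldl_cons]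
    simp only [zero_add]
    rw [bfold_key cs 1 (by omega)]
    simp [pvSeg, List.flatMap_map]

-- ===== VERDICT (by name: the statement is the Claim_ definition above) =====
theorem accum_spec : Claim_equal_accum := by
  intro x _
  unfold Spec_accum accum accum_alt
  exact congrArg String.ofList (accum_lists_key x.toList)
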